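-- pv_equiv track=rewrite | github.com/NerdyDaveBelleville/class-creator | utils/export.py | format_meeting_days
-- ===== SOURCE A (Python) =====
-- def format_meeting_days(days_str: str) -> str:
--     """
--     Format meeting days string for the output CSV.
--
--     Args:
--         days_str: Comma-separated list of meeting days (e.g., "Monday,Wednesday,Friday")
--
--     Returns:
--         Formatted meeting days string (e.g., "mon|wed|fri")
--     """
--     day_map = {
--         'Monday': 'mon',
--         'Tuesday': 'tue',
--         'Wednesday': 'wed',
--         'Thursday': 'thu',
--         'Friday': 'fri',
--         'Saturday': 'sat',
--         'Sunday': 'sun'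
--     }
--
--     # Split by comma and handle potential spaces
--     days = [day.strip() for day in days_str.split(',')]
--
--     # Map each day to its 3-letter abbreviation
--     formatted_days = []
--     for day in days:
--         if day in day_map:
--             formatted_days.append(day_map[day])
--         else:
--             # Try to handle already abbreviated days
--             day_lower = day.lower()
--             if day_lower in ['mon', 'tue', 'wed', 'thu', 'fri', 'sat', 'sun']:
--                 formatted_days.append(day_lower)
--             else:
--                 # Fallback - use first 3 letters
--                 formatted_days.append(day_lower[:3])
--
--     # Join with pipe character
--     return '|'.join(formatted_days)
-- ===== SOURCE B (Python) =====
-- def format_meeting_days(days_str: str) -> str: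
--     """Format meeting days string for the output CSV."""
--     return '|'.join(day.strip().lower()[:3] for day in days_str.split(','))
-- ===== Notes on version B (the rewrite author's own statement) =====
-- stated objective: simpler
-- what changed: Dropped the day-name lookup table and the three-way branch: every branch of A returns exactly the first three letters of the stripped, lowercased token, so B computes day.strip().lower()[:3] directly in a single join over the split.
import Mathlib
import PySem

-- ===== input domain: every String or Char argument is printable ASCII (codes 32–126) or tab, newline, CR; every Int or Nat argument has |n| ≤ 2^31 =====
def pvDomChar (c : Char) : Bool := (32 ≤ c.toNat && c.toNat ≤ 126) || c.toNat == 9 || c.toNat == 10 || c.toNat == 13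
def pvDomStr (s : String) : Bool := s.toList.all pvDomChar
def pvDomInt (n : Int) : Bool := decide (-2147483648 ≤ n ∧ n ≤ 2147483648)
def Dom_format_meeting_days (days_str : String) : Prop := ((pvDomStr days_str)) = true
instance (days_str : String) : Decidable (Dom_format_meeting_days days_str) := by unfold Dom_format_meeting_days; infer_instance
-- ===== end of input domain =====

-- B drops A's lookup table and three-way branch: every branch returns the first three
-- letters of the stripped lowercased token, so B computes that directly (objective: simpler).

-- ===== PORT A =====
def pvDayMap : PySem.Dict String String :=
  PySem.Dict.mk [("Monday", "mon"), ("Tuesday", "tue"), ("Wednesday", "wed"),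
                 ("Thursday", "thu"), ("Friday", "fri"), ("Saturday", "sat"), ("Sunday", "sun")]

def format_meeting_days (days_str : String) : String :=
  -- sep "," is nonempty, so split? never returns none; the none branch is unreachable
  match PySem.Str.split? days_str "," with
  | none => ""
  | some parts =>
  let days := parts.map (fun day => PySem.Str.strip day)
  let formatted_days := days.foldl (fun acc day =>
    if pvDayMap.contains day then
      acc ++ [pvDayMap.getD day ""]
    else
      let day_lower := PySem.Str.lower day
      if (["mon", "tue", "wed", "thu", "fri", "sat", "sun"] : List String).contains day_lower then
        acc ++ [day_lower]
      else
        acc ++ [PySem.Str.slice day_lower none (some 3)]) []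
  PySem.Str.join "|" formatted_days

-- ===== PORT B =====
def format_meeting_days_alt (days_str : String) : String :=
  -- sep "," is nonempty, so split? never returns none; the none branch is unreachable
  match PySem.Str.split? days_str "," with
  | none => ""
  | some parts =>
    PySem.Str.join "|" (parts.map
      (fun day => PySem.Str.slice (PySem.Str.lower (PySem.Str.strip day)) none (some 3)))

-- ===== PRECONDITION & SPEC =====
def Spec_format_meeting_days (days_str : String) (out : String) : Prop := out = format_meeting_days_alt days_str
instance (days_str : String) (out : String) : Decidable (Spec_format_meeting_days days_str out) := by unfold Spec_format_meeting_days; infer_instance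

-- ===== CLAIM (what is proved, stated in full; the proofs are below) =====
def Claim_equal_format_meeting_days : Prop := ∀ (days_str : String), Dom_format_meeting_days days_str → Spec_format_meeting_days days_str (format_meeting_days days_str)

-- ===== LEMMAS AND PROOFS =====

-- each element A produces equals the stripped-lowered-first-three of B
theorem pv_elem_eq (day : String) :
    (if pvDayMap.contains day then pvDayMap.getD day ""
     else
       if (["mon", "tue", "wed", "thu", "fri", "sat", "sun"] : List String).contains
           (PySem.Str.lower day) then
         PySem.Str.lower day
       else PySem.Str.slice (PySem.Str.lower day) none (some 3))
    = PySem.Str.slice (PySem.Str.lower day) none (some 3) := by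
  by_cases h1 : pvDayMap.contains day = true
  · have hcase : day = "Monday" ∨ day = "Tuesday" ∨ day = "Wednesday" ∨ day = "Thursday" ∨
        day = "Friday" ∨ day = "Saturday" ∨ day = "Sunday" := by
      simp only [pvDayMap, PySem.Dict.contains_mk, List.any_eq_true, List.mem_cons,
        List.not_mem_nil, or_false, beq_iff_eq] at h1
      rcases h1 with ⟨p, hp, he⟩
      rcases hp with h | h | h | h | h | h | h <;> subst h <;> simp_all [eq_comm]
    rcases hcase with h | h | h | h | h | h | h <;> subst h <;> decide
  · rw [if_neg h1]
    by_cases h2 : (["mon", "tue", "wed", "thu", "fri", "sat", "sun"] : List String).contains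
        (PySem.Str.lower day) = true
    · rw [if_pos h2]
      have hcase := (List.contains_iff_mem).mp h2
      simp only [List.mem_cons, List.not_mem_nil, or_false] at hcase
      rcases hcase with h | h | h | h | h | h | h <;> rw [h] <;> decide
    · rw [if_neg h2]

-- A's append loop over stripped tokens equals B's direct map
theorem pv_foldl (l acc : List String) :
    List.foldl (fun acc day =>
      if pvDayMap.contains day = true then acc ++ [pvDayMap.getD day ""]
      else
        if (["mon", "tue", "wed", "thu", "fri", "sat", "sun"] : List String).contains
            (PySem.Str.lower day) = true then acc ++ [PySem.Str.lower day]
        else acc ++ [PySem.Str.slice (PySem.Str.lower day) none (some 3)]) acc l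
    = acc ++ l.map (fun day => PySem.Str.slice (PySem.Str.lower day) none (some 3)) := by
  induction l generalizing acc with
  | nil => simp
  | cons a t ih =>
    rw [List.foldl_cons, List.map_cons]
    have h := pv_elem_eq a
    by_cases h1 : pvDayMap.contains a = true
    · rw [if_pos h1] at h; rw [if_pos h1, ih, h]; simp
    · rw [if_neg h1] at h ⊢
      by_cases h2 : (["mon", "tue", "wed", "thu", "fri", "sat", "sun"] : List String).contains
          (PySem.Str.lower a) = true
      · rw [if_pos h2] at h; rw [if_pos h2, ih, ← h]; simp
      · rw [if_neg h2, ih]; simp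

-- ===== VERDICT (by name: the statement is the Claim_ definition above) =====
theorem format_meeting_days_spec : Claim_equal_format_meeting_days := by
  intro days_str _
  unfold Spec_format_meeting_days format_meeting_days format_meeting_days_alt
  cases h : PySem.Str.split? days_str "," with
  | none => simp
  | some parts =>
    simp only
    rw [pv_foldl, List.nil_append, List.map_map]
    rfl
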